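-- pv_equiv track=rewrite | github.com/junnei/codetree-TILs | 240201/Carry 피하기 2/escaping-carry-2.py | is_carry
-- ===== SOURCE A (Python) =====
-- def is_carry(num_arr):
--     while len(num_arr):
--         tmp_arr = []
--         sum_val = 0
--         for num in num_arr:
--             if num // 10 > 0:
--                 tmp_arr.append(num//10)
--             sum_val += num % 10
--         if sum_val >= 10:
--             return True
--         num_arr = tmp_arr
--     return False
-- ===== SOURCE B (Python) =====
-- def digit_cols(n):
--     # digit column values of n the way A sees them: n % 10 first,
--     # then peel with // 10 only while the quotient is positive
--     digs = [n % 10]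
--     while n // 10 > 0:
--         n //= 10
--         digs.append(n % 10)
--     return digs
--
--
-- def merge(cols, digs):
--     # elementwise sum, keeping the longer tail
--     if not cols:
--         return digs[:]
--     if not digs:
--         return cols[:]
--     return [cols[0] + digs[0]] + merge(cols[1:], digs[1:])
--
--
-- def is_carry(num_arr):
--     cols = []
--     for num in num_arr:
--         cols = merge(cols, digit_cols(num))
--     return any(c >= 10 for c in cols)
-- ===== Notes on version B (the rewrite author's own statement) =====
-- stated objective: alternative
-- what changed: A repeatedly rebuilds the whole list level by level (sum the last digits, carry the positive quotients to a new list, loop); B makes one row-major pass that builds each number's digit-column list once and merges them elementwise, then tests any column sum >= 10.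
import Mathlib
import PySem

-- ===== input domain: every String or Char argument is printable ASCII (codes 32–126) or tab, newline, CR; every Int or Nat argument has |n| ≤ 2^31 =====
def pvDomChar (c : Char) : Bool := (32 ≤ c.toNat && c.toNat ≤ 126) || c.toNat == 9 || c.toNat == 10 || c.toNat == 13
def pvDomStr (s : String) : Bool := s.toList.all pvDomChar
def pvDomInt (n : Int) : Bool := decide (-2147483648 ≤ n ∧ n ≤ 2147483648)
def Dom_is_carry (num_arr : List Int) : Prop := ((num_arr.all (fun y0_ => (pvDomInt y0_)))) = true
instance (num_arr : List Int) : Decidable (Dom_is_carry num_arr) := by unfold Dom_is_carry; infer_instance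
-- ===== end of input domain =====

-- B re-implements A by a different decomposition: one row-major pass merging each
-- number's digit-column list, instead of A's level-by-level list rebuilding; objective: alternative.

-- ===== PORT A =====
-- termination helpers for the ports (cited by decreasing_by below)
def pvNext (l : List Int) : List Int :=
  l.filterMap (fun n => if PySem.Int.floordiv n 10 > 0 then some (PySem.Int.floordiv n 10) else none)

def pvMu (l : List Int) : Nat := (l.map Int.toNat).sum + l.length

theorem pv_fd_toNat_lt {n : Int} (h : 0 < PySem.Int.floordiv n 10) :
    (PySem.Int.floordiv n 10).toNat < n.toNat := by
  rw [PySem.Int.floordiv_eq_ediv_of_pos (by norm_num)] at h ⊢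
  omega

theorem pvMu_next_le (l : List Int) : pvMu (pvNext l) ≤ pvMu l := by
  induction l with
  | nil => simp [pvNext, pvMu]
  | cons n l ih =>
    by_cases hfd : 0 < PySem.Int.floordiv n 10
    · have hlt := pv_fd_toNat_lt hfd
      simp only [pvNext, List.filterMap_cons, if_pos hfd] at *
      simp only [pvMu, List.map_cons, List.sum_cons, List.length_cons] at *
      omega
    · simp only [pvNext, List.filterMap_cons, if_neg hfd] at *
      simp only [pvMu, List.map_cons, List.sum_cons, List.length_cons] at *
      omega

theorem pvMu_next_lt {l : List Int} (h : l ≠ []) : pvMu (pvNext l) < pvMu l := by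
  cases l with
  | nil => exact absurd rfl h
  | cons n l =>
    have hle := pvMu_next_le l
    by_cases hfd : 0 < PySem.Int.floordiv n 10
    · have hlt := pv_fd_toNat_lt hfd
      simp only [pvNext, List.filterMap_cons, if_pos hfd] at *
      simp only [pvMu, List.map_cons, List.sum_cons, List.length_cons] at *
      omega
    · simp only [pvNext, List.filterMap_cons, if_neg hfd] at *
      simp only [pvMu, List.map_cons, List.sum_cons, List.length_cons] at *
      omega

-- A's inner for-loop: builds tmp_arr and sum_val over the current row
def aLoop : List Int → List Int → Int → List Int × Int
  | [], tmp, s => (tmp, s)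
  | num :: rest, tmp, s =>
      aLoop rest
        (if PySem.Int.floordiv num 10 > 0 then tmp ++ [PySem.Int.floordiv num 10] else tmp)
        (s + PySem.Int.mod num 10)

theorem aLoop_eq (l : List Int) : ∀ tmp s, aLoop l tmp s =
    (tmp ++ pvNext l, s + ((l.map (fun n => PySem.Int.mod n 10)).sum)) := by
  induction l with
  | nil => intro tmp s; simp [aLoop, pvNext]
  | cons n l ih =>
    intro tmp s
    by_cases hfd : 0 < PySem.Int.floordiv n 10
    · simp only [aLoop, ih, pvNext, List.filterMap_cons, List.map_cons, List.sum_cons,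
        if_pos hfd, Prod.mk.injEq]
      exact ⟨by simp, by omega⟩
    · simp only [aLoop, ih, pvNext, List.filterMap_cons, List.map_cons, List.sum_cons,
        if_neg hfd, Prod.mk.injEq]
      exact ⟨by trivial, by omega⟩

-- A: while num_arr nonempty, sum last digits; carry the positive quotients to the next row
def is_carry (num_arr : List Int) : Bool :=
  if num_arr.length ≠ 0 then
    let r := aLoop num_arr [] 0
    if r.2 ≥ 10 then true else is_carry r.1
  else false
termination_by pvMu num_arr
decreasing_by
  rw [aLoop_eq]
  simpa using pvMu_next_lt (by simpa using ‹num_arr.length ≠ 0›)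

-- ===== PORT B =====
-- digit_cols: n % 10 first, then peel with // 10 while the quotient is positive
def digitCols (n : Int) : List Int :=
  PySem.Int.mod n 10 ::
    (if h : PySem.Int.floordiv n 10 > 0 then digitCols (PySem.Int.floordiv n 10) else [])
termination_by n.toNat
decreasing_by exact pv_fd_toNat_lt h

-- merge: elementwise sum, keeping the longer tail
def pvMerge : List Int → List Int → List Int
  | [], d => d
  | c :: cs, [] => c :: cs
  | c :: cs, d :: ds => (c + d) :: pvMerge cs ds

def is_carry_alt (num_arr : List Int) : Bool :=
  (num_arr.foldl (fun cols num => pvMerge cols (digitCols num)) []).any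
    (fun c => decide (c ≥ 10))

-- ===== PRECONDITION & SPEC =====
def Spec_is_carry (num_arr : List Int) (out : Bool) : Prop := out = is_carry_alt num_arr
instance (num_arr : List Int) (out : Bool) : Decidable (Spec_is_carry num_arr out) := by unfold Spec_is_carry; infer_instance

-- ===== CLAIM (what is proved, stated in full; the proofs are below) =====
def Claim_equal_is_carry : Prop := ∀ (num_arr : List Int), Dom_is_carry num_arr → Spec_is_carry num_arr (is_carry num_arr)

-- ===== LEMMAS AND PROOFS =====

-- column list accumulated by B's fold, and the level-0 column sum
def colsOf (l : List Int) : List Int :=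
  l.foldl (fun cols num => pvMerge cols (digitCols num)) []

def sum0 (l : List Int) : Int := (l.map (fun n => PySem.Int.mod n 10)).sum

theorem pvMerge_nil_right (c : List Int) : pvMerge c [] = c := by
  cases c <;> rfl

theorem pvMerge_assoc (a : List Int) : ∀ b c, pvMerge (pvMerge a b) c = pvMerge a (pvMerge b c) := by
  induction a with
  | nil => intro b c; rfl
  | cons x xs ih =>
    intro b c
    cases b with
    | nil => rfl
    | cons y ys =>
      cases c with
      | nil => rw [pvMerge_nil_right, pvMerge_nil_right]
      | cons z zs => simp only [pvMerge, ih]; ring_nf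

theorem foldl_merge (l : List Int) : ∀ c,
    l.foldl (fun cols num => pvMerge cols (digitCols num)) c = pvMerge c (colsOf l) := by
  induction l with
  | nil => intro c; simp [colsOf, pvMerge_nil_right]
  | cons n l ih =>
    intro c
    simp only [colsOf, List.foldl_cons] at *
    rw [ih, ih (pvMerge [] (digitCols n))]
    simp only [pvMerge, pvMerge_assoc]

theorem colsOf_cons (n : Int) (l : List Int) :
    colsOf (n :: l) = pvMerge (digitCols n) (colsOf l) := by
  show (n :: l).foldl _ [] = _
  rw [List.foldl_cons, foldl_merge]
  rfl

theorem colsOf_decomp (l : List Int) (h : l ≠ []) :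
    colsOf l = sum0 l :: colsOf (pvNext l) := by
  induction l with
  | nil => exact absurd rfl h
  | cons n l ih =>
    rw [colsOf_cons, digitCols]
    by_cases hfd : 0 < PySem.Int.floordiv n 10
    · rw [dif_pos hfd]
      cases l with
      | nil =>
        rw [show colsOf ([] : List Int) = [] from rfl, pvMerge_nil_right]
        simp only [pvNext, List.filterMap_cons, List.filterMap_nil, if_pos hfd, sum0,
          List.map_cons, List.map_nil, List.sum_cons, List.sum_nil]
        have hc : colsOf [PySem.Int.floordiv n 10] = digitCols (PySem.Int.floordiv n 10) := rfl
        rw [hc]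
        simp
      | cons m l' =>
        rw [ih (by simp)]
        simp only [pvNext, List.filterMap_cons, if_pos hfd, sum0, List.map_cons, List.sum_cons]
        simp only [pvMerge, List.cons.injEq]
        exact ⟨trivial, (colsOf_cons _ _).symm⟩
    · rw [dif_neg hfd]
      cases l with
      | nil =>
        rw [show colsOf ([] : List Int) = [] from rfl, pvMerge_nil_right]
        have hn : pvNext [n] = [] := by
          simp only [pvNext, List.filterMap_cons, List.filterMap_nil, if_neg hfd]
        rw [hn, show colsOf ([] : List Int) = [] from rfl]
        simp [sum0]
      | cons m l' =>
        rw [ih (by simp)]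
        simp only [pvNext, List.filterMap_cons, if_neg hfd, sum0, List.map_cons, List.sum_cons]
        simp only [pvMerge]

theorem main_aux : ∀ (k : Nat) (l : List Int), pvMu l < k →
    is_carry l = (colsOf l).any (fun c => decide (c ≥ 10)) := by
  intro k
  induction k with
  | zero => intro l h; omega
  | succ k ih =>
    intro l h
    cases l with
    | nil => simp [is_carry, colsOf]
    | cons n rest =>
      rw [is_carry]
      have hne : (n :: rest).length ≠ 0 := by simp
      rw [if_pos hne, aLoop_eq]
      simp only [List.nil_append]
      rw [colsOf_decomp (n :: rest) (by simp)]
      have hmu : pvMu (pvNext (n :: rest)) < k := by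
        have := pvMu_next_lt (l := n :: rest) (by simp)
        omega
      simp only [sum0, List.any_cons]
      split
      · next hs =>
        have e : ∀ m : Int, PySem.Int.mod m 10 = m % 10 := fun m =>
          PySem.Int.mod_eq_emod_of_pos (by norm_num)
        have hs2 : (10:Int) ≤ n % 10 + ((rest.map (fun n => n % 10)).sum) := by
          simpa [e] using hs
        simp [hs2]
      · next hs =>
        have hs' : ¬ (10:Int) ≤ ((n :: rest).map (fun n => PySem.Int.mod n 10)).sum := by
          simpa using hs
        simp only [ge_iff_le, hs', decide_false, Bool.false_or]
        exact ih _ hmu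

theorem is_carry_spec : Claim_equal_is_carry := by
  intro num_arr _
  unfold Spec_is_carry
  have h := main_aux (pvMu num_arr + 1) num_arr (by omega)
  rw [h]
  rfl
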